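-- pv_equiv track=rewrite | github.com/Edvandro-Nogueira/matriz_acessibilidade | Acessibilidade_grafos.py | no_ordenado
-- ===== SOURCE A (Python) =====
-- def no_ordenado(lista_de_no):
--     lista_ordenada = []
--     for i in lista_de_no:
--         for a in i:
--             if a not in lista_ordenada:
--                 lista_ordenada.append(a)
--     lista_ordenada.sort()
--     return lista_ordenada
-- ===== SOURCE B (Python) =====
-- def no_ordenado(lista_de_no):
--     # flatten, sort once, dedup adjacent duplicates in a single pass
--     plana = []
--     for i in lista_de_no:
--         plana.extend(i)
--     plana.sort()
--     resultado = []
--     for a in plana: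
--         if not resultado or resultado[-1] != a:
--             resultado.append(a)
--     return resultado
-- ===== Notes on version B (the rewrite author's own statement) =====
-- stated objective: faster
-- what changed: B flattens everything, sorts once, and removes duplicates by comparing adjacent elements of the sorted list, instead of A's per-element membership scan of the growing result followed by a sort.
import Mathlib
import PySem

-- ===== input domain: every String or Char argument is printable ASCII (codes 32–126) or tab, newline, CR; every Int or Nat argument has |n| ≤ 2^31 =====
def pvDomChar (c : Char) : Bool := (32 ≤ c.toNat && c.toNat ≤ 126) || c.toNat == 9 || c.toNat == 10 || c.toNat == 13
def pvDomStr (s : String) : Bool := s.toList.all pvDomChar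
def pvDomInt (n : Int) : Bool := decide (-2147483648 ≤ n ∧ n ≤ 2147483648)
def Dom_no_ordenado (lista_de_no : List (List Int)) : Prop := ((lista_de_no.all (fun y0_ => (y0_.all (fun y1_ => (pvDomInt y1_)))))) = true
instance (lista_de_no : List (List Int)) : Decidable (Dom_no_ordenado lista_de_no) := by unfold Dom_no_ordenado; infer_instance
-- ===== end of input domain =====

-- B flattens, sorts once, and dedups adjacent equal elements in one pass (O(n log n)) instead of A's
-- membership-scan dedup followed by a sort; A = B is proved on the whole domain.


-- ===== PORT A =====
def no_ordenado (lista_de_no : List (List Int)) : List Int :=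
  let lista_ordenada : List Int :=
    lista_de_no.foldl (fun acc i =>
      i.foldl (fun acc a => if a ∈ acc then acc else acc ++ [a]) acc) []
  PySem.List.sorted lista_ordenada (fun x => x) false

-- ===== PORT B =====
-- one step of B's adjacency dedup: append a unless resultado is nonempty with last element == a
def pvAdjStep (resultado : List Int) (a : Int) : List Int :=
  match resultado.getLast? with
  | none => resultado ++ [a]
  | some b => if b ≠ a then resultado ++ [a] else resultado

def no_ordenado_alt (lista_de_no : List (List Int)) : List Int :=
  let plana : List Int := lista_de_no.foldl (fun acc i => acc ++ i) []
  let plana := PySem.List.sorted plana (fun x => x) false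
  plana.foldl pvAdjStep []

-- ===== PRECONDITION & SPEC =====
def Spec_no_ordenado (lista_de_no : List (List Int)) (out : List Int) : Prop := out = no_ordenado_alt lista_de_no
instance (lista_de_no : List (List Int)) (out : List Int) : Decidable (Spec_no_ordenado lista_de_no out) := by unfold Spec_no_ordenado; infer_instance

-- ===== CLAIM (what is proved, stated in full; the proofs are below) =====
def Claim_equal_no_ordenado : Prop := ∀ (lista_de_no : List (List Int)), Dom_no_ordenado lista_de_no → Spec_no_ordenado lista_de_no (no_ordenado lista_de_no)

-- ===== LEMMAS AND PROOFS =====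

-- A's dedup-by-membership loop is exactly set insertion, so its nested fold builds set(flatten)
theorem pv_foldA_eq_ofList (l : List (List Int)) :
    l.foldl (fun acc i => i.foldl (fun acc a => if a ∈ acc then acc else acc ++ [a]) acc) []
      = PySem.Set.ofList l.flatten := by
  have hstep : (fun (acc : List Int) (a : Int) => if a ∈ acc then acc else acc ++ [a]) = PySem.Set.add := by
    funext s a
    simp [PySem.Set.add, PySem.Set.contains]
  rw [PySem.Set.ofList_eq_foldl, List.foldl_flatten, hstep]

theorem pv_foldB_flatten (l : List (List Int)) (acc : List Int) :
    l.foldl (fun acc i => acc ++ i) acc = acc ++ l.flatten := by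
  induction l generalizing acc with
  | nil => simp
  | cons h t ih => simp [List.foldl_cons, ih, List.flatten_cons]

-- in a strictly increasing list every element is ≤ the last one
theorem pv_mem_le_getLast (l : List Int) (hl : l.Pairwise (· < ·)) (a : Int) (ha : a ∈ l)
    (b : Int) (hb : l.getLast? = some b) : a ≤ b := by
  induction l with
  | nil => cases ha
  | cons c t ih =>
    cases t with
    | nil =>
      simp at hb ha; omega
    | cons d u =>
      rw [List.getLast?_cons_cons] at hb
      have hbmem : b ∈ d :: u := List.mem_of_getLast? hb
      rcases List.mem_cons.mp ha with rfl | hat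
      · have := (List.pairwise_cons.mp hl).1 b hbmem
        omega
      · exact ih (List.pairwise_cons.mp hl).2 hat hb

-- invariant of B's adjacency-dedup pass over a sorted list
theorem pv_adj_fold (xs : List Int) : ∀ (acc : List Int), xs.Pairwise (· ≤ ·) → acc.Pairwise (· < ·) →
    (∀ a ∈ acc, ∀ x ∈ xs, a ≤ x) →
    (xs.foldl pvAdjStep acc).Pairwise (· < ·) ∧
      ∀ y, (y ∈ xs.foldl pvAdjStep acc ↔ y ∈ acc ∨ y ∈ xs) := by
  induction xs with
  | nil => intro acc _ hacc _; simpa using hacc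
  | cons x t ih =>
    intro acc hx hacc hle
    have hxt : t.Pairwise (· ≤ ·) := (List.pairwise_cons.mp hx).2
    have hxle : ∀ z ∈ t, x ≤ z := (List.pairwise_cons.mp hx).1
    rw [List.foldl_cons]
    rcases hlast : acc.getLast? with _ | b
    · -- acc = []
      have hanil : acc = [] := List.getLast?_eq_none_iff.mp hlast
      subst hanil
      have hstep : pvAdjStep [] x = [x] := by simp [pvAdjStep]
      rw [hstep]
      have ⟨hp, hm⟩ := ih [x] hxt (by simp) (by simpa using hxle)
      refine ⟨hp, fun y => ?_⟩
      rw [hm y]; simp [List.mem_cons]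
    · have hbmem : b ∈ acc := List.mem_of_getLast? hlast
      by_cases hbe : b = x
      · -- skip: x already last of acc
        have hstep : pvAdjStep acc x = acc := by simp [pvAdjStep, hlast, hbe]
        rw [hstep]
        have ⟨hp, hm⟩ := ih acc hxt hacc (fun a ha z hz => hle a ha z (List.mem_cons_of_mem _ hz))
        refine ⟨hp, fun y => ?_⟩
        rw [hm y]
        constructor
        · tauto
        · rintro (h | h)
          · exact Or.inl h
          · rcases List.mem_cons.mp h with rfl | h
            · exact Or.inl (hbe ▸ hbmem)
            · exact Or.inr h
      · -- append x
        have hstep : pvAdjStep acc x = acc ++ [x] := by simp [pvAdjStep, hlast, hbe]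
        rw [hstep]
        have hax : ∀ a ∈ acc, a < x := by
          intro a ha
          have h1 : a ≤ b := pv_mem_le_getLast acc hacc a ha b hlast
          have h2 : b ≤ x := hle b hbmem x (List.mem_cons_self)
          omega
        have hacc' : (acc ++ [x]).Pairwise (· < ·) := by
          rw [List.pairwise_append]
          exact ⟨hacc, by simp, by simpa using hax⟩
        have hle' : ∀ a ∈ acc ++ [x], ∀ z ∈ t, a ≤ z := by
          intro a ha z hz
          rcases List.mem_append.mp ha with h | h
          · exact hle a h z (List.mem_cons_of_mem _ hz)
          · simp at h; subst h; exact hxle z hz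
        have ⟨hp, hm⟩ := ih (acc ++ [x]) hxt hacc' hle'
        refine ⟨hp, fun y => ?_⟩
        rw [hm y]
        simp [List.mem_append, List.mem_cons]
        tauto

-- ===== VERDICT (by name: the statement is the Claim_ definition above) =====
theorem no_ordenado_spec : Claim_equal_no_ordenado := by
  intro l _
  unfold Spec_no_ordenado no_ordenado no_ordenado_alt
  rw [pv_foldA_eq_ofList, pv_foldB_flatten]
  set flat := l.flatten with hflat
  simp only [List.nil_append]
  have hsorted : (PySem.List.sorted flat (fun x => x) false).Pairwise (· ≤ ·) := by
    simpa using PySem.List.sorted_pairwise (κ := Int) flat (fun x => x)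
  have ⟨hp, hm⟩ := pv_adj_fold (PySem.List.sorted flat (fun x => x) false) [] hsorted (by simp) (by simp)
  apply PySem.List.sorted_eq_of_perm_of_pairwise_lt
  · rw [List.perm_ext_iff_of_nodup (hp.imp fun h => ne_of_lt h) (PySem.Set.nodup_ofList flat)]
    intro y
    rw [hm y, PySem.Set.mem_ofList]
    simp [PySem.List.mem_sorted]
  · simpa using hp
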